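-- pv_equiv track=rewrite | github.com/MilanMolnar/Codecool_SI_week5 | TreeBuilding/TreeBuild.py | convert
-- ===== SOURCE A (Python) =====
-- def convert(listOfDict_to_dict):
--     list = []
--     for index in range(len(listOfDict_to_dict)):
--         for key in listOfDict_to_dict[index]:
--             list.append(listOfDict_to_dict[index][key])
--     it = iter(list)
--     res_dct = dict(zip(it, it))
--     return res_dct
-- ===== SOURCE B (Python) =====
-- def convert(listOfDict_to_dict):
--     res = {}
--     pending = None
--     for d in listOfDict_to_dict:
--         for v in d.values():
--             if pending is None:
--                 pending = v
--             else:
--                 res[pending] = v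
--                 pending = None
--     return res
-- ===== Notes on version B (the rewrite author's own statement) =====
-- stated objective: simpler
-- what changed: Instead of building an intermediate flat list and then pairing it with the iter/zip trick, B makes one pass over the values keeping a 'pending key' slot and inserts each completed pair into the result dict directly.
import Mathlib
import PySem

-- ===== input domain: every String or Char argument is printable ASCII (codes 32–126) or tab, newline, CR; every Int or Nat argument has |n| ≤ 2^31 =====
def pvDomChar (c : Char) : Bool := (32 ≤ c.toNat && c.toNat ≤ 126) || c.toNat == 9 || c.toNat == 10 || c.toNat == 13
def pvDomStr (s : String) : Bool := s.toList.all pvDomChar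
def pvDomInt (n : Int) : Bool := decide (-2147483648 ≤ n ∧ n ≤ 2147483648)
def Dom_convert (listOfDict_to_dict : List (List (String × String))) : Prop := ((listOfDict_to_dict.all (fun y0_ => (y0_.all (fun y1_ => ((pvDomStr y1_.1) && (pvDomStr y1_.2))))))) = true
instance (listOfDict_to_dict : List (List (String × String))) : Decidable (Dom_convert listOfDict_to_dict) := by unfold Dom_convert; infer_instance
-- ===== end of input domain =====

-- B replaces the flat-list-then-iter/zip pairing with one pass over the values keeping a
-- 'pending key' slot and inserting completed pairs into the result dict directly (simpler).

-- ===== PORT A =====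
-- it = iter(list); dict(zip(it, it)) — pairs consecutive elements, dropping a trailing odd one
def pairUpA : List String → List (String × String)
  | k :: v :: rest => (k, v) :: pairUpA rest
  | _ => []

def convert (listOfDict_to_dict : List (List (String × String))) : List (String × String) :=
  -- list = []; for index in range(len(..)): for key in ..[index]: list.append(..[index][key])
  let lst := (PySem.List.pyRange 0 (listOfDict_to_dict.length : Int) 1).foldl
    (fun acc i =>
      let d := PySem.Dict.mk (PySem.List.pyGetD listOfDict_to_dict i [])
      d.keys.foldl (fun a k => a ++ [d.getD k ""]) acc)  -- d[key]; getD "" exact: key ∈ d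
    []
  -- res_dct = dict(zip(it, it))
  ((pairUpA lst).foldl (fun r p => r.insert p.1 p.2) PySem.Dict.empty).items

-- ===== PORT B =====
def stepB (st : PySem.Dict String String × Option String) (v : String) :
    PySem.Dict String String × Option String :=
  match st.2 with
  | none => (st.1, some v)
  | some k => (st.1.insert k v, none)

def convert_alt (listOfDict_to_dict : List (List (String × String))) : List (String × String) :=
  (listOfDict_to_dict.foldl
    (fun st d => ((PySem.Dict.mk d).values).foldl stepB st)
    (PySem.Dict.empty, none)).1.items

-- ===== PRECONDITION & SPEC =====
-- Pre_ excludes association lists in which one inner dict carries duplicate keys: such lists do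
-- not represent any Python dict (Python dicts have unique keys), so A never receives them.
def Pre_convert (listOfDict_to_dict : List (List (String × String))) : Prop :=
  ∀ d ∈ listOfDict_to_dict, (d.map Prod.fst).Nodup
instance (listOfDict_to_dict : List (List (String × String))) : Decidable (Pre_convert listOfDict_to_dict) := by unfold Pre_convert; infer_instance

def pvWitness_convert : (List (List (String × String))) := [[("a", "b"), ("c", "d")], [("e", "f")]]

def Spec_convert (listOfDict_to_dict : List (List (String × String))) (out : List (String × String)) : Prop := out = convert_alt listOfDict_to_dict
instance (listOfDict_to_dict : List (List (String × String))) (out : List (String × String)) : Decidable (Spec_convert listOfDict_to_dict out) := by unfold Spec_convert; infer_instance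

-- ===== CLAIM (what is proved, stated in full; the proofs are below) =====
def Claim_equal_convert : Prop := ∀ (listOfDict_to_dict : List (List (String × String))), Dom_convert listOfDict_to_dict → Pre_convert listOfDict_to_dict → Spec_convert listOfDict_to_dict (convert listOfDict_to_dict)

-- ===== LEMMAS AND PROOFS =====

-- appending one mapped element at a time is acc ++ map
theorem foldl_append_singleton {α β : Type} (f : α → β) :
    ∀ (ks : List α) (acc : List β), ks.foldl (fun a k => a ++ [f k]) acc = acc ++ ks.map f := by
  intro ks
  induction ks with
  | nil => simp
  | cons k ks ih => intro acc; simp [List.foldl_cons, ih]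

-- appending a block per element is acc ++ flatten of the blocks
theorem foldl_append_blocks {α β : Type} (g : α → List β) :
    ∀ (l : List α) (acc : List β),
      l.foldl (fun a d => a ++ g d) acc = acc ++ (l.map g).flatten := by
  intro l
  induction l with
  | nil => simp
  | cons d l ih => intro acc; simp [List.foldl_cons, ih]

-- the nested fold of B is the fold of stepB over the flattened value blocks
theorem foldl_nested_eq_flatten (g : List (String × String) → List String) :
    ∀ (l : List (List (String × String))) (st : PySem.Dict String String × Option String),
      l.foldl (fun st d => (g d).foldl stepB st) st = ((l.map g).flatten).foldl stepB st := by
  intro l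
  induction l with
  | nil => intro st; simp
  | cons d l ih => intro st; simp [List.foldl_cons, List.foldl_append, ih]

-- pairing with a pending slot
def pairUpP (p : Option String) (vs : List String) : List (String × String) :=
  match p with
  | none => pairUpA vs
  | some k =>
    match vs with
    | [] => []
    | v :: rest => (k, v) :: pairUpA rest

-- the pending-slot pass computes the dict of the paired-up list
theorem foldl_stepB_eq_pairUp :
    ∀ (vs : List String) (d : PySem.Dict String String) (p : Option String),
      (vs.foldl stepB (d, p)).1 =
        (pairUpP p vs).foldl (fun r q => r.insert q.1 q.2) d := by
  intro vs
  induction vs with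
  | nil => intro d p; cases p <;> simp [pairUpP, pairUpA]
  | cons v rest ih =>
    intro d p
    cases p with
    | none =>
      have h := ih d (some v)
      simp only [List.foldl_cons, stepB] at *
      rw [h]
      cases rest <;> simp [pairUpP, pairUpA]
    | some k =>
      have h := ih (d.insert k v) none
      simp only [List.foldl_cons, stepB] at *
      rw [h]
      simp [pairUpP]

-- under unique keys, iterating keys and looking each up yields the value list
theorem keys_fold_eq_values (d : List (String × String)) (hnd : (d.map Prod.fst).Nodup)
    (acc : List String) :
    (PySem.Dict.mk d).keys.foldl (fun a k => a ++ [(PySem.Dict.mk d).getD k ""]) acc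
      = acc ++ d.map Prod.snd := by
  rw [foldl_append_singleton]
  congr 1
  have h := PySem.Dict.values_eq_map_keys (PySem.Dict.mk d) (by simpa using hnd) ""
  simpa using h.symm

-- ===== VERDICT (by name: the statement is the Claim_ definition above) =====
theorem convert_spec : Claim_equal_convert := by
  intro l _ hpre
  unfold Spec_convert convert convert_alt
  rw [foldl_nested_eq_flatten, foldl_stepB_eq_pairUp]
  have hflat :
      (PySem.List.pyRange 0 (l.length : Int) 1).foldl
        (fun acc i =>
          let d := PySem.Dict.mk (PySem.List.pyGetD l i [])
          d.keys.foldl (fun a k => a ++ [d.getD k ""]) acc) []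
        = (l.map (fun d => (PySem.Dict.mk d).values)).flatten := by
    rw [PySem.List.foldl_pyRange_pyGetD' (a := 0) (xs := l)
      (f := fun acc d =>
        (PySem.Dict.mk d).keys.foldl (fun a k => a ++ [(PySem.Dict.mk d).getD k ""]) acc)
      (d := []) (init := []) (by norm_num)]
    simp only [Int.toNat_zero, List.drop_zero]
    rw [PySem.List.foldl_congr_mem
      (g := fun acc d => acc ++ (PySem.Dict.mk d).values)
      (h := by
        intro acc d hd
        have := keys_fold_eq_values d (hpre d hd) acc
        simpa using this)]
    rw [foldl_append_blocks]
    simp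
  rw [hflat]
  simp [pairUpP]
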